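-- pv_equiv track=rewrite | github.com/miruts-xz/competitive-programming | contests/codeforces/118edu/Poisoned Dagger.py | solve
-- ===== SOURCE A (Python) =====
-- def solve(n, h, attacks):
--     gaps = [attacks[i]-attacks[i-1] for i in range(1, n)]
--     gaps.sort()
--     mn = h//n + (1 if h%n else 0)
--     rem = h
--
--     spared = 0
--     for i, gap in enumerate(gaps):
--         if gap >= mn:
--             if mn*(n-i) < rem:
--                 mn = min(gap, rem//(n-i) + (1 if rem%(n-i) else 0))
--                 rem -= mn
--             else:
--                 rem = 0
--                 break
--         else:
--             # spared += mn-gap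
--             rem -= gap
--     if rem-mn > 0:
--         mn += rem-mn
--     return mn
-- ===== SOURCE B (Python) =====
-- def solve(n, h, attacks):
--     gaps = [attacks[i] - attacks[i-1] for i in range(1, n)]
--
--     def damage(d):
--         return sum(min(g, d) for g in gaps) + d
--
--     lo, hi = 1, h
--     while lo < hi:
--         mid = (lo + hi) // 2
--         if damage(mid) >= h:
--             hi = mid
--         else:
--             lo = mid + 1
--     return lo
-- ===== Notes on version B (the rewrite author's own statement) =====
-- stated objective: alternative
-- what changed: Replaced A's sorted-gap greedy distribution loop (with ceiling-division updates and a post-loop fixup) by a binary search over the poison duration d using the monotone total-damage function damage(d) = sum(min(gap,d)) + d; B does no sorting and no greedy state.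
-- intended difference: For h <= 0 (except the band n <= h <= -1 where both return 1) A returns a non-positive 'duration' (h for n=1, 0 for n>=2, ediv h n for n<=-1), an artifact of its fixup arithmetic; B returns 1, the least positive duration, which already deals >= 1 >= h damage and is the intended value. — e.g. on solve(2, 0, [1, 2]): A returns 0, B returns 1
-- outside the precondition, e.g. on solve(2, 27, [9, -9]): A returns 45, B returns 27
import Mathlib
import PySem

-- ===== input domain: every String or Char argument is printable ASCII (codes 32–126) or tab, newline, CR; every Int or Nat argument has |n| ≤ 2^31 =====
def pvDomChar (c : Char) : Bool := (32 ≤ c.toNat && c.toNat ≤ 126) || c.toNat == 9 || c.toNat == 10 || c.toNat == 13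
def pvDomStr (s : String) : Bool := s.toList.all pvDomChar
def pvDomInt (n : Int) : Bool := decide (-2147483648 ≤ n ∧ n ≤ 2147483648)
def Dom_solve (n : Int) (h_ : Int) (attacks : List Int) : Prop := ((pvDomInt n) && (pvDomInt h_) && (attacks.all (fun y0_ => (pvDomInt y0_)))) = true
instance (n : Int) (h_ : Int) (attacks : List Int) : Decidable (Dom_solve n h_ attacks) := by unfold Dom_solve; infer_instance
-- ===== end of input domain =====

-- B replaces A's sorted-gap greedy distribution by a binary search on the poison
-- duration d over the monotone damage function sum(min(gap,d)) + d (objective: alternative).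

-- ===== PORT A =====
-- gaps = [attacks[i]-attacks[i-1] for i in range(1, n)]  (pyGetD: in range under Pre_)
def aGaps (n : Int) (attacks : List Int) : List Int :=
  (PySem.List.pyRange 1 n 1).map
    (fun i => PySem.List.pyGetD attacks i 0 - PySem.List.pyGetD attacks (i - 1) 0)

-- h//n + (1 if h%n else 0)
def aCeil (a b : Int) : Int :=
  PySem.Int.floordiv a b + (if PySem.Int.mod a b ≠ 0 then 1 else 0)

-- the for-loop over enumerate(gaps); returns the final (mn, rem); break = early return
def aLoop (n : Int) : List Int → Int → Int → Int → Int × Int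
  | [], _, mn, rem => (mn, rem)
  | g :: t, i, mn, rem =>
    if g ≥ mn then
      if mn * (n - i) < rem then
        let mn' := min g (aCeil rem (n - i))
        aLoop n t (i + 1) mn' (rem - mn')
      else (mn, 0)
    else aLoop n t (i + 1) mn (rem - g)

def solve (n : Int) (h_ : Int) (attacks : List Int) : Int :=
  let gaps := PySem.List.sorted (aGaps n attacks) (fun x => x) false
  let mn := aCeil h_ n
  let p := aLoop n gaps 0 mn h_
  if p.2 - p.1 > 0 then p.1 + (p.2 - p.1) else p.1

-- ===== PORT B =====
def bGaps (n : Int) (attacks : List Int) : List Int :=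
  (PySem.List.pyRange 1 n 1).map
    (fun i => PySem.List.pyGetD attacks i 0 - PySem.List.pyGetD attacks (i - 1) 0)

-- damage(d) = sum(min(g, d) for g in gaps) + d
def bDamage (gaps : List Int) (d : Int) : Int :=
  gaps.foldl (fun s g => s + min g d) 0 + d

-- the while-loop of the binary search
def bSearch (gaps : List Int) (h_ lo hi : Int) : Int :=
  if hlt : lo < hi then
    let mid := PySem.Int.floordiv (lo + hi) 2
    if bDamage gaps mid ≥ h_ then bSearch gaps h_ lo mid
    else bSearch gaps h_ (mid + 1) hi
  else lo
termination_by (hi - lo).toNat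
decreasing_by
  · have h2 : PySem.Int.floordiv (lo + hi) 2 < hi := by
      rw [PySem.Int.floordiv_lt_iff_lt_mul (by omega)]; omega
    omega
  · have h2 := PySem.Int.floordiv_two_mid_bounds (le_of_lt hlt)
    omega

def solve_alt (n : Int) (h_ : Int) (attacks : List Int) : Int :=
  bSearch (bGaps n attacks) h_ 1 h_

-- ===== PRECONDITION & SPEC =====
-- Pre_ excludes n = 0 (A raises ZeroDivisionError) and n > len(attacks) (A raises
-- IndexError), and attack lists whose first n times are not non-decreasing: there the
-- gaps are negative and A's value is leftover loop state (overshoot), an accident of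
-- its implementation that no caller of this contest function would specify.
def Pre_solve (n : Int) (h_ : Int) (attacks : List Int) : Prop :=
  n ≠ 0 ∧ n ≤ attacks.length ∧ (attacks.take n.toNat).Pairwise (· ≤ ·)
instance (n : Int) (h_ : Int) (attacks : List Int) : Decidable (Pre_solve n h_ attacks) := by
  unfold Pre_solve; infer_instance

def pvWitness_solve : Int × Int × List Int := (3, 10, [2, 5, 11])

-- For h ≤ 0 (except n ≤ h ≤ -1, where both return 1) A returns a non-positive
-- "duration" (h for n = 1, 0 for n ≥ 2, ediv h n for n ≤ -1) while B returns 1, the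
-- least positive duration, which already deals ≥ 1 ≥ h damage — the intended value.
def D_solve (n : Int) (h_ : Int) (attacks : List Int) : Prop :=
  h_ ≤ 0 ∧ (h_ = 0 ∨ h_ < n)
instance (n : Int) (h_ : Int) (attacks : List Int) : Decidable (D_solve n h_ attacks) := by
  unfold D_solve; infer_instance

def Spec_solve (n : Int) (h_ : Int) (attacks : List Int) (out : Int) : Prop :=
  ¬ D_solve n h_ attacks → out = solve_alt n h_ attacks
instance (n : Int) (h_ : Int) (attacks : List Int) (out : Int) : Decidable (Spec_solve n h_ attacks out) := by
  unfold Spec_solve; infer_instance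

def pvDiffWitness_solve : Int × Int × List Int := (2, 0, [1, 2])
def pvDiffWitnessOut_solve : Int × Int := (0, 1)

-- ===== CLAIM (what is proved, stated in full; the proofs are below) =====
def Claim_unchanged_solve : Prop := ∀ (n : Int) (h_ : Int) (attacks : List Int),
  Dom_solve n h_ attacks → Pre_solve n h_ attacks → Spec_solve n h_ attacks (solve n h_ attacks)
def Claim_changed_solve : Prop := Dom_solve (pvDiffWitness_solve.1) (pvDiffWitness_solve.2.1) (pvDiffWitness_solve.2.2) ∧ Pre_solve (pvDiffWitness_solve.1) (pvDiffWitness_solve.2.1) (pvDiffWitness_solve.2.2) ∧ D_solve (pvDiffWitness_solve.1) (pvDiffWitness_solve.2.1) (pvDiffWitness_solve.2.2) ∧ solve (pvDiffWitness_solve.1) (pvDiffWitness_solve.2.1) (pvDiffWitness_solve.2.2) = pvDiffWitnessOut_solve.1 ∧ solve_alt (pvDiffWitness_solve.1) (pvDiffWitness_solve.2.1) (pvDiffWitness_solve.2.2) = pvDiffWitnessOut_solve.2 ∧ pvDiffWitnessOut_solve.1 ≠ pvDiffWitnessOut_solve.2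
def Claim_exact_solve : Prop := ∀ (n : Int) (h_ : Int) (attacks : List Int),
  Dom_solve n h_ attacks → Pre_solve n h_ attacks → D_solve n h_ attacks → solve n h_ attacks ≠ solve_alt n h_ attacks

-- ===== LEMMAS AND PROOFS =====

-- "r is the least duration ≥ lo whose total damage reaches rem"
def Good (t : List Int) (rem lo r : Int) : Prop :=
  lo ≤ r ∧ rem ≤ bDamage t r ∧ ∀ d, lo ≤ d → d < r → bDamage t d < rem

lemma foldl_min_shift (t : List Int) (d a : Int) :
    t.foldl (fun s g => s + min g d) a = a + t.foldl (fun s g => s + min g d) 0 := by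
  induction t generalizing a with
  | nil => simp
  | cons x t ih => simp only [List.foldl]; rw [ih, ih (0 + min x d)]; ring

lemma bDamage_cons (g : Int) (t : List Int) (d : Int) :
    bDamage (g :: t) d = min g d + bDamage t d := by
  simp only [bDamage, List.foldl]
  rw [foldl_min_shift]; ring

lemma bDamage_const (t : List Int) (d : Int) (h : ∀ x ∈ t, d ≤ x) :
    bDamage t d = (t.length + 1) * d := by
  induction t with
  | nil => simp [bDamage]
  | cons x t ih =>
    rw [bDamage_cons, ih (fun y hy => h y (List.mem_cons_of_mem _ hy))]
    have : d ≤ x := h x List.mem_cons_self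
    have : min x d = d := by omega
    rw [this]; simp only [List.length_cons]; push_cast; ring

lemma bDamage_le (t : List Int) (d : Int) :
    bDamage t d ≤ (t.length + 1) * d := by
  induction t with
  | nil => simp [bDamage]
  | cons x t ih =>
    rw [bDamage_cons]
    have : min x d ≤ d := min_le_right _ _
    simp only [List.length_cons]
    push_cast
    nlinarith [ih]

lemma bDamage_ge (t : List Int) (d : Int) (hd : 0 ≤ d) (h : ∀ x ∈ t, 0 ≤ x) :
    d ≤ bDamage t d := by
  induction t with
  | nil => simp [bDamage]
  | cons x t ih =>
    rw [bDamage_cons]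
    have h1 : 0 ≤ x := h x List.mem_cons_self
    have h2 := ih (fun y hy => h y (List.mem_cons_of_mem _ hy))
    omega

lemma bDamage_perm {xs ys : List Int} (hp : xs.Perm ys) (d : Int) :
    bDamage xs d = bDamage ys d := by
  induction hp with
  | nil => rfl
  | cons x _ ih => rw [bDamage_cons, bDamage_cons, ih]
  | swap x y t => rw [bDamage_cons, bDamage_cons, bDamage_cons, bDamage_cons]; ring
  | trans _ _ ih1 ih2 => rw [ih1, ih2]

-- ceiling-division facts for aCeil with a positive divisor
lemma aCeil_bounds (a b : Int) (hb : 0 < b) :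
    a ≤ b * aCeil a b ∧ b * (aCeil a b - 1) < a := by
  have hd := PySem.Int.floordiv_mul_add_mod a b
  have hm : 0 ≤ PySem.Int.mod a b ∧ PySem.Int.mod a b < b := by
    rw [PySem.Int.mod_eq_emod_of_pos hb]
    exact ⟨Int.emod_nonneg a (by omega), Int.emod_lt_of_pos a hb⟩
  unfold aCeil
  split_ifs with h0
  · have h1 : 1 ≤ PySem.Int.mod a b := by omega
    constructor <;> nlinarith [hd, hm.1, hm.2]
  · have h1 : PySem.Int.mod a b = 0 := by omega
    constructor <;> nlinarith [hd, hm.1, hm.2]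

-- with a negative divisor the python ceiling h//n + (h%n != 0) is non-positive
-- with a negative divisor the python ceiling h//b + (h%b != 0) is euclidean division
lemma aCeil_neg_eq_ediv (a b : Int) (hb : b ≤ -1) : aCeil a b = a / b := by
  unfold aCeil
  have hfd : PySem.Int.floordiv a b = a / b - if 0 ≤ b ∨ b ∣ a then 0 else 1 := by
    simp only [PySem.Int.floordiv]; exact Int.fdiv_eq_ediv
  by_cases hd : b ∣ a
  · have h0 : PySem.Int.mod a b = 0 := (PySem.Int.mod_eq_zero_iff_dvd a b).mpr hd
    rw [hfd, if_pos (Or.inr hd), h0]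
    norm_num
  · have h0 : PySem.Int.mod a b ≠ 0 := fun h => hd ((PySem.Int.mod_eq_zero_iff_dvd a b).mp h)
    rw [hfd, if_neg (by push Not; exact ⟨by omega, hd⟩), if_pos h0]
    ring

-- h // 1 + (1 if h % 1 else 0) = h
lemma aCeil_one (a : Int) : aCeil a 1 = a := by
  simp [aCeil, PySem.Int.floordiv, PySem.Int.mod, Int.fmod_one]

-- euclidean division in the band n ≤ h ≤ -1 is exactly 1
lemma ediv_band (h n : Int) (hn : n ≤ h) (hh : h ≤ -1) : h / n = 1 := by
  have hn1 : n ≤ -1 := by omega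
  have hmod : h % n = h % (-n) := (Int.emod_neg h n).symm
  have h1 : 0 ≤ h % n := Int.emod_nonneg h (by omega)
  have h2 : h % n < -n := by
    rw [hmod]; exact Int.emod_lt_of_pos h (by omega)
  have h3 := Int.emod_add_mul_ediv h n
  nlinarith [sq_nonneg (h / n - 1)]

-- the quotient is at least 2 when h < n ≤ -1
lemma ediv_ge_two (h n : Int) (hn : n ≤ -1) (hh : h < n) : 2 ≤ h / n := by
  have hmod : h % n = h % (-n) := (Int.emod_neg h n).symm
  have h1 : 0 ≤ h % n := Int.emod_nonneg h (by omega)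
  have h3 := Int.emod_add_mul_ediv h n
  by_contra hlt
  have hq : h / n ≤ 1 := by omega
  nlinarith

-- the final fix-up after the loop
def aFix (p : Int × Int) : Int := if p.2 - p.1 > 0 then p.1 + (p.2 - p.1) else p.1

-- main loop invariant: the loop (plus fix-up) computes the least d ≥ mn with damage ≥ rem
lemma aLoop_correct (n : Int) : ∀ (t : List Int) (i mn rem : Int),
    t.Pairwise (· ≤ ·) → 1 ≤ mn → n - i = t.length + 1 →
    Good t rem mn (aFix (aLoop n t i mn rem)) := by
  intro t
  induction t with
  | nil =>
    intro i mn rem _ hmn _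
    simp only [aLoop, aFix]
    split_ifs with h
    · exact ⟨by omega, by simp [bDamage], fun d h1 h2 => by simp [bDamage]; omega⟩
    · exact ⟨le_refl _, by simp [bDamage]; omega, fun d h1 h2 => by omega⟩
  | cons g t ih =>
    intro i mn rem hpw hmn hlen
    have hall : ∀ x ∈ t, g ≤ x := (List.pairwise_cons.mp hpw).1
    have hpw' : t.Pairwise (· ≤ ·) := (List.pairwise_cons.mp hpw).2
    have hlen' : n - (i + 1) = (t.length : Int) + 1 := by
      simp only [List.length_cons] at hlen; push_cast at hlen ⊢; omega
    have hm : n - i = (t.length : Int) + 2 := by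
      simp only [List.length_cons] at hlen; push_cast at hlen; omega
    simp only [aLoop]
    by_cases hge : g ≥ mn
    · by_cases hlt : mn * (n - i) < rem
      · -- update branch
        simp only [if_pos hge, if_pos hlt]
        set m := n - i with hmdef
        set c := aCeil rem m with hcdef
        have hmpos : 0 < m := by omega
        obtain ⟨hc1, hc2⟩ := aCeil_bounds rem m hmpos
        have hcmn : mn < c := by nlinarith
        set mn' := min g c with hmn'def
        have hmn'1 : mn ≤ mn' := by omega
        have hIH := ih (i + 1) mn' (rem - mn') hpw' (by omega) hlen'
        set r := aFix (aLoop n t (i + 1) mn' (rem - mn')) with hrdef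
        obtain ⟨hr1, hr2, hr3⟩ := hIH
        refine ⟨by omega, ?_, ?_⟩
        · rw [bDamage_cons]
          have : mn' ≤ min g r := by omega
          omega
        · intro d hd1 hd2
          by_cases hdc : d < mn'
          · have : ∀ x ∈ g :: t, d ≤ x := by
              intro x hx
              rcases List.mem_cons.mp hx with h | h
              · omega
              · have := hall x h; omega
            rw [bDamage_const _ _ this]
            have hdmn' : d ≤ mn' - 1 := by omega
            have : ((g :: t).length : Int) + 1 = m := by
              simp only [List.length_cons]; push_cast; omega
            rw [this]
            nlinarith [mul_le_mul_of_nonneg_left (show d ≤ c - 1 by omega) (le_of_lt hmpos)]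
          · -- mn' ≤ d < r
            rw [not_lt] at hdc
            by_cases hgc : g < c
            · -- mn' = g : exact decomposition
              have hmg : mn' = g := by omega
              rw [bDamage_cons]
              have : min g d = g := by omega
              rw [this]
              have := hr3 d (by omega) hd2
              omega
            · -- mn' = c : the recursion returns mn' itself, interval empty
              have hmc : mn' = c := by omega
              exfalso
              have hrc : r = mn' := by
                by_contra hne
                have hlt2 : mn' < r := by omega
                have := hr3 mn' (le_refl _) hlt2
                have hconst : bDamage t mn' = ((t.length : Int) + 1) * mn' := by
                  apply bDamage_const
                  intro x hx; have := hall x hx; omega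
                rw [hconst] at this
                nlinarith
              omega
      · -- break branch: rem ≤ mn * (n - i)
        simp only [if_pos hge, if_neg hlt, aFix]
        have : ¬ ((0 : Int) - mn > 0) := by omega
        rw [if_neg this]
        refine ⟨le_refl _, ?_, fun d h1 h2 => by omega⟩
        have hconst : bDamage (g :: t) mn = (((g :: t).length : Int) + 1) * mn := by
          apply bDamage_const
          intro x hx
          rcases List.mem_cons.mp hx with h | h
          · omega
          · have := hall x h; omega
        rw [hconst]
        simp only [List.length_cons] at *
        push_cast at *
        nlinarith
    · -- else branch: g < mn, rem -= g
      simp only [if_neg hge]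
      have hIH := ih (i + 1) mn (rem - g) hpw' hmn hlen'
      set r := aFix (aLoop n t (i + 1) mn (rem - g)) with hrdef
      obtain ⟨hr1, hr2, hr3⟩ := hIH
      refine ⟨hr1, ?_, ?_⟩
      · rw [bDamage_cons]
        have : min g r = g := by omega
        omega
      · intro d hd1 hd2
        rw [bDamage_cons]
        have : min g d = g := by omega
        have := hr3 d hd1 hd2
        omega

-- the binary search returns the least d ≥ 1 with damage ≥ h, given the invariants
lemma bSearch_correct (gaps : List Int) (h_ : Int) : ∀ (lo hi : Int),
    lo ≤ hi → 1 ≤ lo → h_ ≤ bDamage gaps hi →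
    (∀ d, 1 ≤ d → d < lo → bDamage gaps d < h_) →
    Good gaps h_ 1 (bSearch gaps h_ lo hi) := by
  intro lo hi
  induction lo, hi using bSearch.induct gaps h_ with
  | case1 lo hi hlt mid hge ih =>
    intro _ hlo hhi hbelow
    rw [bSearch, dif_pos hlt, if_pos hge]
    have hb := PySem.Int.floordiv_two_mid_bounds (le_of_lt hlt)
    exact ih (by exact hb.1) hlo hge hbelow
  | case2 lo hi hlt mid hge ih =>
    intro _ hlo hhi hbelow
    rw [bSearch, dif_pos hlt, if_neg hge]
    have hb := PySem.Int.floordiv_two_mid_bounds (le_of_lt hlt)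
    have hmidlt : mid < hi := by
      show PySem.Int.floordiv (lo + hi) 2 < hi
      rw [PySem.Int.floordiv_lt_iff_lt_mul (by omega)]; omega
    refine ih (by omega) (by omega) hhi ?_
    intro d hd1 hd2
    by_cases hdlo : d < lo
    · exact hbelow d hd1 hdlo
    · -- lo ≤ d ≤ mid: damage d ≤ damage mid < h_  (monotonicity via a direct bound)
      have hmono : bDamage gaps d ≤ bDamage gaps mid := by
        have : ∀ (t : List Int), bDamage t d ≤ bDamage t mid := by
          intro t
          induction t with
          | nil => simp [bDamage]; omega
          | cons x t iht => rw [bDamage_cons, bDamage_cons]; omega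
        exact this gaps
      omega
  | case3 lo hi hnlt =>
    intro hle hlo hhi hbelow
    rw [bSearch, dif_neg hnlt]
    have : lo = hi := by omega
    exact ⟨hlo, by rw [this]; exact hhi, hbelow⟩

lemma good_unique {t : List Int} {rem r1 r2 : Int}
    (h1 : Good t rem 1 r1) (h2 : Good t rem 1 r2) : r1 = r2 := by
  obtain ⟨a1, a2, a3⟩ := h1
  obtain ⟨b1, b2, b3⟩ := h2
  by_contra hne
  rcases lt_or_gt_of_ne hne with h | h
  · have := b3 r1 a1 h; omega
  · have := a3 r2 b1 h; omega

-- under Pre_ every gap is non-negative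
lemma gaps_nonneg (n : Int) (attacks : List Int)
    (hn : 1 ≤ n) (hlen : n ≤ attacks.length)
    (hsort : (attacks.take n.toNat).Pairwise (· ≤ ·)) :
    ∀ g ∈ aGaps n attacks, 0 ≤ g := by
  intro g hg
  simp only [aGaps, List.mem_map] at hg
  obtain ⟨i, hi, hgi⟩ := hg
  rw [PySem.List.mem_pyRange_one] at hi
  have hi1 : 1 ≤ i := hi.1
  have hi2 : i < n := hi.2
  have hilen : i < (attacks.length : Int) := by omega
  have e1 : PySem.List.pyGetD attacks i 0 = attacks[i.toNat]'(by omega) :=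
    PySem.List.pyGetD_eq_getElem attacks 0 (by omega) (by omega)
  have e2 : PySem.List.pyGetD attacks (i - 1) 0 = attacks[(i - 1).toNat]'(by omega) :=
    PySem.List.pyGetD_eq_getElem attacks 0 (by omega) (by omega)
  rw [e1, e2] at hgi
  have hpair : attacks[(i - 1).toNat] ≤ attacks[i.toNat] := by
    have hlt : (i - 1).toNat < i.toNat := by omega
    have hitn : i.toNat < n.toNat := by omega
    have hmono := List.pairwise_iff_getElem.mp hsort (i - 1).toNat i.toNat
      (by simp [List.length_take]; omega) (by simp [List.length_take]; omega) hlt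
    simpa [List.getElem_take] using hmono
  omega

lemma gaps_length (n : Int) (attacks : List Int) (hn : 1 ≤ n) :
    ((aGaps n attacks).length : Int) = n - 1 := by
  simp only [aGaps, List.length_map, PySem.List.length_pyRange_one]
  omega

-- A = B whenever at least one hp must be burnt
lemma solve_eq_alt_of_pos (n : Int) (h_ : Int) (attacks : List Int)
    (hn0 : n ≠ 0) (hlen : n ≤ attacks.length) (hh : 1 ≤ h_)
    (hsort : (attacks.take n.toNat).Pairwise (· ≤ ·)) :
    solve n h_ attacks = solve_alt n h_ attacks := by
  unfold solve solve_alt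
  have hbg : bGaps n attacks = aGaps n attacks := rfl
  by_cases hneg : n ≤ -1
  · -- n < 0: the gap list is empty, A returns h_ and the binary search returns h_
    have hnil : aGaps n attacks = [] := by
      simp [aGaps, PySem.List.pyRange_one_eq_nil (show n ≤ (1:Int) by omega)]
    have hmn : aCeil h_ n ≤ 0 := by
      rw [aCeil_neg_eq_ediv h_ n hneg]
      exact Int.ediv_nonpos_of_nonneg_of_nonpos (by omega) (by omega)
    have hB := bSearch_correct [] h_ 1 h_ hh (le_refl 1)
      (by simp [bDamage]) (fun d hd1 hd2 => by omega)
    have hSelf : Good [] h_ 1 h_ :=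
      ⟨hh, by simp [bDamage], fun d hd1 hd2 => by simp [bDamage]; omega⟩
    have hBu : bSearch [] h_ 1 h_ = h_ := good_unique hB hSelf
    rw [hbg, hnil]
    rw [show PySem.List.sorted ([] : List Int) (fun x => x) false = [] from rfl]
    simp only [aLoop]
    rw [hBu, if_pos (by omega)]
    omega
  have hn : 1 ≤ n := by omega
  set gaps := aGaps n attacks with hgdef
  set gs := PySem.List.sorted gaps (fun x => x) false with hgs
  have hperm : gs.Perm gaps := PySem.List.sorted_perm gaps (fun x => x) false
  have hpw : gs.Pairwise (· ≤ ·) := PySem.List.sorted_pairwise gaps (fun x => x)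
  have hglen : ((gaps.length : Int)) = n - 1 := gaps_length n attacks hn
  have hgslen : ((gs.length : Int)) = n - 1 := by
    rw [hperm.length_eq]; exact hglen
  have hnn : ∀ g ∈ gaps, 0 ≤ g := gaps_nonneg n attacks hn hlen hsort
  -- A's side
  have hmn1 : 1 ≤ aCeil h_ n := by
    obtain ⟨c1, c2⟩ := aCeil_bounds h_ n (by omega)
    nlinarith
  have hA : Good gs h_ (aCeil h_ n) (aFix (aLoop n gs 0 (aCeil h_ n) h_)) := by
    apply aLoop_correct n gs 0 (aCeil h_ n) h_ hpw hmn1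
    omega
  -- extend A's lower bound from aCeil h_ n down to 1
  have hA1 : Good gs h_ 1 (aFix (aLoop n gs 0 (aCeil h_ n) h_)) := by
    obtain ⟨a1, a2, a3⟩ := hA
    refine ⟨by omega, a2, ?_⟩
    intro d hd1 hd2
    by_cases hdc : d < aCeil h_ n
    · have hle := bDamage_le gs d
      obtain ⟨c1, c2⟩ := aCeil_bounds h_ n (by omega)
      have : ((gs.length : Int) + 1) = n := by omega
      rw [this] at hle
      nlinarith
    · exact a3 d (by omega) hd2
  -- B's side
  have hB : Good gaps h_ 1 (bSearch gaps h_ 1 h_) := by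
    apply bSearch_correct gaps h_ 1 h_ hh (le_refl _)
    · exact bDamage_ge gaps h_ (by omega) hnn
    · intro d hd1 hd2; omega
  -- transfer A's result to the unsorted gap list and conclude
  have hA1' : Good gaps h_ 1 (aFix (aLoop n gs 0 (aCeil h_ n) h_)) := by
    obtain ⟨a1, a2, a3⟩ := hA1
    refine ⟨a1, ?_, ?_⟩
    · rw [← bDamage_perm hperm]; exact a2
    · intro d h1 h2; rw [← bDamage_perm hperm]; exact a3 d h1 h2
  rw [hbg]
  exact good_unique hA1' hB


-- the binary search degenerates for h_ ≤ 0: hi ≤ lo, so it returns lo = 1 at once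
lemma solve_alt_of_nonpos (n : Int) (h_ : Int) (attacks : List Int) (hh : h_ ≤ 0) :
    solve_alt n h_ attacks = 1 := by
  unfold solve_alt
  rw [bSearch, dif_neg (by omega)]

-- ===== VERDICT (by name: the statement is the Claim_ definition above) =====
theorem solve_spec : Claim_unchanged_solve := by
  intro n h_ attacks _ hpre
  obtain ⟨hn0, hlen, hsort⟩ := hpre
  unfold Spec_solve
  intro hnD
  unfold D_solve at hnD
  by_cases hh : 1 ≤ h_
  · exact solve_eq_alt_of_pos n h_ attacks hn0 hlen hh hsort
  · -- ¬D_ and h_ ≤ 0 force the band n ≤ h_ ≤ -1, where both programs return 1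
    have hband : n ≤ h_ ∧ h_ ≤ -1 := by
      constructor <;> omega
    have hneg : n ≤ -1 := by omega
    have hnil : aGaps n attacks = [] := by
      simp [aGaps, PySem.List.pyRange_one_eq_nil (show n ≤ (1:Int) by omega)]
    have hmn : aCeil h_ n = 1 := by
      rw [aCeil_neg_eq_ediv h_ n hneg]
      exact ediv_band h_ n hband.1 hband.2
    rw [solve_alt_of_nonpos n h_ attacks (by omega)]
    unfold solve
    rw [hnil]
    rw [show PySem.List.sorted ([] : List Int) (fun x => x) false = [] from rfl]
    simp only [aLoop]
    rw [hmn, if_neg (by omega)]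

theorem solve_changed : Claim_changed_solve := by
  unfold Claim_changed_solve
  refine ⟨by decide, by decide, by decide, by decide, ?_, by decide⟩
  show solve_alt 2 0 [1, 2] = 1
  exact solve_alt_of_nonpos 2 0 [1, 2] (by omega)

theorem solve_tight : Claim_exact_solve := by
  intro n h_ attacks _ hpre hD
  obtain ⟨hn0, hlen, hsort⟩ := hpre
  obtain ⟨hh0, hD2⟩ := hD
  rw [solve_alt_of_nonpos n h_ attacks hh0]
  by_cases hneg : n ≤ -1
  · -- n ≤ -1: empty gaps, A returns ediv h_ n = 0 (h_ = 0) or ≥ 2 (h_ < n)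
    have hnil : aGaps n attacks = [] := by
      simp [aGaps, PySem.List.pyRange_one_eq_nil (show n ≤ (1:Int) by omega)]
    have hce := aCeil_neg_eq_ediv h_ n hneg
    unfold solve
    rw [hnil]
    rw [show PySem.List.sorted ([] : List Int) (fun x => x) false = [] from rfl]
    simp only [aLoop]
    rcases hD2 with h0 | hlt
    · subst h0
      rw [hce, Int.zero_ediv, if_neg (by omega)]
      omega
    · have hq : 2 ≤ h_ / n := ediv_ge_two h_ n hneg (by omega)
      rw [hce, if_neg (by omega)]
      omega
  · have hn : 1 ≤ n := by omega
    unfold solve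
    set gaps := aGaps n attacks with hgdef
    set gs := PySem.List.sorted gaps (fun x => x) false with hgs
    have hperm : gs.Perm gaps := PySem.List.sorted_perm gaps (fun x => x) false
    have hglen : ((gaps.length : Int)) = n - 1 := gaps_length n attacks hn
    have hgslen : ((gs.length : Int)) = n - 1 := by rw [hperm.length_eq]; exact hglen
    have hnn : ∀ g ∈ gaps, 0 ≤ g := gaps_nonneg n attacks hn hlen hsort
    cases hcons : gs with
    | nil =>
      -- n = 1: A returns h_ ≤ 0 ≠ 1
      have hn1 : n = 1 := by
        rw [hcons] at hgslen; simp at hgslen; omega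
      simp only [aLoop]
      rw [hn1, aCeil_one, if_neg (by omega)]
      omega
    | cons g t =>
      -- n ≥ 2: A breaks immediately with (mn, 0) and the fix-up returns 0 ≠ 1
      have hg0 : 0 ≤ g := hnn g (hperm.mem_iff.mp (by rw [hcons]; exact List.mem_cons_self))
      obtain ⟨hc1, hc2⟩ := aCeil_bounds h_ n (by omega)
      have hmn0 : aCeil h_ n ≤ 0 := by nlinarith
      simp only [aLoop]
      rw [if_pos (by omega : g ≥ aCeil h_ n), if_neg (by nlinarith : ¬ aCeil h_ n * (n - 0) < h_)]
      split_ifs <;> omega
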